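-- pv_equiv track=rewrite | github.com/r0mch1ck/vk_task | test_data_processor.py | calculate_longest_growth_decline_streak
-- ===== SOURCE A (Python) =====
-- def calculate_longest_growth_decline_streak(values):
--     if len(values) > 1:
--         longest_streak = 1
--         current_streak = 1
--         for i in range(1, len(values)):
--             if (values[i] > values[i - 1] and values[i - 1] > 0) or (values[i] < values[i - 1] and values[i - 1] < 0):
--                 current_streak += 1
--                 longest_streak = max(longest_streak, current_streak)
--             else:
--                 current_streak = 1
--         return longest_streak
--     return 1
-- ===== SOURCE B (Python) =====
-- def calculate_longest_growth_decline_streak(values):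
--     n = len(values)
--     if n <= 1:
--         return 1
--     # positions where the growth/decline streak is broken
--     breaks = [i for i in range(1, n)
--               if not ((values[i] > values[i - 1] and values[i - 1] > 0) or
--                       (values[i] < values[i - 1] and values[i - 1] < 0))]
--     edges = [0] + breaks + [n]
--     return max(b - a for a, b in zip(edges, edges[1:]))
-- ===== Notes on version B (the rewrite author's own statement) =====
-- stated objective: alternative
-- what changed: Instead of A's running (longest,current) accumulator, B collects the break positions (indices where the streak condition fails), frames them with 0 and n, and returns the maximum difference between consecutive break positions.
import Mathlib
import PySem

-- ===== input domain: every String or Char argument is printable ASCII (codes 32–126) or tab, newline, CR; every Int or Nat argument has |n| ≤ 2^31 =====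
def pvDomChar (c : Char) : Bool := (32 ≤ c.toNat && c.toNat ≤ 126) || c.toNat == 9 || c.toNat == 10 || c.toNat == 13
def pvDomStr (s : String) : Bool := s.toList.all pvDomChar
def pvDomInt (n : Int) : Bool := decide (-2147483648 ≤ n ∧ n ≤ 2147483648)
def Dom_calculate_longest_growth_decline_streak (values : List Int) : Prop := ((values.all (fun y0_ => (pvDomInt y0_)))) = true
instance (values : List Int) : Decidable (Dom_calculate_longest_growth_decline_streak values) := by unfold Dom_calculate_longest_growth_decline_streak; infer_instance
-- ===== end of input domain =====

-- B replaces A's running (longest,current) accumulator loop by a different decomposition: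
-- collect the break positions (indices where the streak condition fails), frame them with
-- 0 and n, and return the maximum gap between consecutive break positions. Same O(n) cost.

-- ===== PORT A =====
-- for-loop over range(1, len(values)) with (longest_streak, current_streak) accumulator;
-- pyGetD is exact here: every index i of pyRange 1 len is in range.
def calculate_longest_growth_decline_streak (values : List Int) : Int :=
  if 1 < (values.length : Int) then
    ((PySem.List.pyRange 1 (values.length : Int) 1).foldl
      (fun (s : Int × Int) i =>
        if (PySem.List.pyGetD values (i - 1) 0 < PySem.List.pyGetD values i 0 ∧
              0 < PySem.List.pyGetD values (i - 1) 0) ∨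
           (PySem.List.pyGetD values i 0 < PySem.List.pyGetD values (i - 1) 0 ∧
              PySem.List.pyGetD values (i - 1) 0 < 0) then
          (max s.1 (s.2 + 1), s.2 + 1)
        else (s.1, 1)) (1, 1)).1
  else 1

-- ===== PORT B =====
-- break positions via a filtered range, then max over adjacent differences of the framed
-- edge list; the `none` arm of max? is unreachable (edges has at least two elements).
def calculate_longest_growth_decline_streak_alt (values : List Int) : Int :=
  let n : Int := values.length
  if n ≤ 1 then 1
  else
    let breaks := (PySem.List.pyRange 1 n 1).filter
      (fun i => !decide ((PySem.List.pyGetD values (i - 1) 0 < PySem.List.pyGetD values i 0 ∧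
                            0 < PySem.List.pyGetD values (i - 1) 0) ∨
                         (PySem.List.pyGetD values i 0 < PySem.List.pyGetD values (i - 1) 0 ∧
                            PySem.List.pyGetD values (i - 1) 0 < 0)))
    let edges := 0 :: breaks ++ [n]
    match PySem.List.max? ((edges.zip edges.tail).map (fun p => p.2 - p.1)) (fun x => x) with
    | some m => m
    | none => 1

-- ===== PRECONDITION & SPEC =====
def Spec_calculate_longest_growth_decline_streak (values : List Int) (out : Int) : Prop := out = calculate_longest_growth_decline_streak_alt values
instance (values : List Int) (out : Int) : Decidable (Spec_calculate_longest_growth_decline_streak values out) := by unfold Spec_calculate_longest_growth_decline_streak; infer_instance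

-- ===== CLAIM (what is proved, stated in full; the proofs are below) =====
def Claim_equal_calculate_longest_growth_decline_streak : Prop := ∀ (values : List Int), Dom_calculate_longest_growth_decline_streak values → Spec_calculate_longest_growth_decline_streak values (calculate_longest_growth_decline_streak values)

-- ===== LEMMAS AND PROOFS =====

-- A's loop body over a boolean flag
def pvStepA (s : Int × Int) (f : Bool) : Int × Int :=
  if f then (max s.1 (s.2 + 1), s.2 + 1) else (s.1, 1)

-- break positions determined by a flag list (flag k describes transition k → k+1)
def pvBrk (bs : List Bool) : List Int :=
  (List.range bs.length).filterMap (fun k => if bs.getD k false then none else some ((k : Int) + 1))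

-- successive differences starting from a previous edge
def pvGaps : Int → List Int → List Int
  | _, [] => []
  | e, x :: xs => (x - e) :: pvGaps x xs

-- last element with a default
def pvLastD (e : Int) : List Int → Int
  | [] => e
  | x :: xs => pvLastD x xs

lemma pvLastD_append (e x : Int) (l : List Int) : pvLastD e (l ++ [x]) = x := by
  induction l generalizing e with
  | nil => rfl
  | cons y t ih => simpa [pvLastD] using ih y

lemma pvLastD_le (e m : Int) (l : List Int) (he : e ≤ m) (hl : ∀ x ∈ l, x ≤ m) :
    pvLastD e l ≤ m := by
  induction l generalizing e with
  | nil => exact he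
  | cons y t ih => exact ih y (hl y (by simp)) (fun x hx => hl x (by simp [hx]))

lemma pvGaps_append (e x : Int) (l : List Int) :
    pvGaps e (l ++ [x]) = pvGaps e l ++ [x - pvLastD e l] := by
  induction l generalizing e with
  | nil => rfl
  | cons y t ih => simp [pvGaps, pvLastD, ih y]

lemma pvBrk_concat (bs : List Bool) (b : Bool) :
    pvBrk (bs ++ [b]) = pvBrk bs ++ (if b then [] else [(bs.length : Int) + 1]) := by
  unfold pvBrk
  rw [List.length_append, List.length_cons, List.length_nil, List.range_succ,
      List.filterMap_append]
  congr 1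
  · apply List.filterMap_congr
    intro k hk
    rw [List.getD_append _ _ _ _ (by simpa using List.mem_range.mp hk)]
  · simp [List.getD]
    cases b <;> simp

lemma pvBrk_mem_le (bs : List Bool) (x : Int) (hx : x ∈ pvBrk bs) : x ≤ (bs.length : Int) := by
  unfold pvBrk at hx
  simp only [List.mem_filterMap, List.mem_range] at hx
  obtain ⟨k, hk, h⟩ := hx
  split at h
  · exact absurd h (by simp)
  · cases h; omega

-- the central invariant: A's accumulator machine computes the max gap and the distance
-- to the last break
lemma pv_invA (bs : List Bool) :
    bs.foldl pvStepA (1, 1) =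
      ((pvGaps 0 (pvBrk bs ++ [(bs.length : Int) + 1])).foldl max 0,
       ((bs.length : Int) + 1) - pvLastD 0 (pvBrk bs)) := by
  induction bs using List.reverseRecOn with
  | nil => simp [pvBrk, pvGaps, pvLastD]
  | append_singleton bs b ih =>
    have hL : pvLastD 0 (pvBrk bs) ≤ (bs.length : Int) :=
      pvLastD_le _ _ _ (by positivity) (pvBrk_mem_le bs)
    rw [List.foldl_append, ih, pvBrk_concat]
    cases b with
    | true =>
      simp only [if_true, List.append_nil, List.length_append, List.length_cons,
        List.length_nil, List.foldl_cons, List.foldl_nil]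
      push_cast
      rw [pvGaps_append, pvGaps_append, List.foldl_append, List.foldl_append]
      simp only [pvStepA, if_true, List.foldl_cons, List.foldl_nil, Prod.mk.injEq]
      constructor <;> omega
    | false =>
      simp only [Bool.false_eq_true, if_false, List.length_append, List.length_cons,
        List.length_nil, List.foldl_cons, List.foldl_nil]
      push_cast
      rw [pvGaps_append 0 (((bs.length : Int)) + 1 + 1) (pvBrk bs ++ [((bs.length : Int)) + 1]),
          pvGaps_append, pvLastD_append, List.foldl_append, List.foldl_append,
          List.foldl_append]
      simp only [pvStepA, Bool.false_eq_true, if_false, List.foldl_cons, List.foldl_nil,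
        Prod.mk.injEq]
      constructor <;> omega

-- zip-with-tail differences are pvGaps
lemma pv_zip_gaps (e : Int) (l : List Int) :
    (((e :: l).zip l).map (fun p : Int × Int => p.2 - p.1)) = pvGaps e l := by
  induction l generalizing e with
  | nil => rfl
  | cons x xs ih => simp [pvGaps, ih x]

lemma pv_zip_gaps' (e : Int) (l : List Int) :
    (((e :: l).zip (e :: l).tail).map (fun p : Int × Int => p.2 - p.1)) = pvGaps e l :=
  pv_zip_gaps e l

-- filterMap of an if-none form is map-of-filter
lemma pv_filterMap_if {α β : Type} (q : α → Bool) (f : α → β) (l : List α) :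
    l.filterMap (fun k => if q k then none else some (f k)) =
      (l.filter (fun k => !q k)).map f := by
  induction l with
  | nil => rfl
  | cons x t ih => by_cases h : q x <;> simp [h, ih]

-- the adjacent-pair flags, via absolute indexing
lemma pv_flag_getD (xs : List Int) (k : Nat) (hk : k < xs.length - 1) :
    ((xs.zip xs.tail).map
        (fun p : Int × Int => decide ((p.1 < p.2 ∧ 0 < p.1) ∨ (p.2 < p.1 ∧ p.1 < 0)))).getD k false =
      decide ((xs.getD k 0 < xs.getD (k + 1) 0 ∧ 0 < xs.getD k 0) ∨
              (xs.getD (k + 1) 0 < xs.getD k 0 ∧ xs.getD k 0 < 0)) := by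
  induction xs generalizing k with
  | nil => simp at hk
  | cons x rest ih =>
    cases rest with
    | nil => simp at hk
    | cons y t =>
      cases k with
      | zero => simp [List.getD]
      | succ k' =>
        simp only [List.length_cons] at hk
        have := ih k' (by simpa using hk)
        simpa [List.getD] using this

lemma pv_flags_length (xs : List Int) :
    ((xs.zip xs.tail).map
        (fun p : Int × Int => decide ((p.1 < p.2 ∧ 0 < p.1) ∨ (p.2 < p.1 ∧ p.1 < 0)))).length =
      xs.length - 1 := by
  cases xs <;> simp [List.length_zip]

lemma pvBrk_mem_pos (bs : List Bool) (x : Int) (hx : x ∈ pvBrk bs) : 1 ≤ x := by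
  unfold pvBrk at hx
  simp only [List.mem_filterMap, List.mem_range] at hx
  obtain ⟨k, hk, h⟩ := hx
  split at h
  · exact absurd h (by simp)
  · cases h; omega

-- the adjacent-pair list, expressed through absolute indexing (bridges A's index loop to B's zip)
lemma pairs_eq (xs : List Int) :
    (List.range (xs.length - 1)).map (fun k => (xs.getD k 0, xs.getD (k + 1) 0)) = xs.zip xs.tail := by
  induction xs with
  | nil => simp
  | cons x rest ih =>
    cases rest with
    | nil => simp
    | cons y t =>
      simp only [List.length_cons, Nat.add_sub_cancel, List.tail_cons]
      rw [List.range_succ_eq_map, List.map_cons, List.map_map]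
      have := ih
      simp only [List.length_cons, Nat.add_sub_cancel, List.tail_cons] at this
      simp only [List.getD] at this
      simpa [Function.comp_def, List.getD] using this

-- A's index loop is the flags fold
lemma pvA_fold (xs : List Int) :
    (PySem.List.pyRange 1 (xs.length : Int) 1).foldl
      (fun (s : Int × Int) i =>
        if (PySem.List.pyGetD xs (i - 1) 0 < PySem.List.pyGetD xs i 0 ∧
              0 < PySem.List.pyGetD xs (i - 1) 0) ∨
           (PySem.List.pyGetD xs i 0 < PySem.List.pyGetD xs (i - 1) 0 ∧
              PySem.List.pyGetD xs (i - 1) 0 < 0) then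
          (max s.1 (s.2 + 1), s.2 + 1)
        else (s.1, 1)) (1, 1)
    = ((xs.zip xs.tail).map
        (fun p : Int × Int => decide ((p.1 < p.2 ∧ 0 < p.1) ∨ (p.2 < p.1 ∧ p.1 < 0)))).foldl
        pvStepA (1, 1) := by
  rw [PySem.List.pyRange_one]
  have hlen : (((xs.length : Int)) - 1).toNat = xs.length - 1 := by omega
  rw [hlen, List.foldl_map, ← pairs_eq, List.foldl_map, List.foldl_map]
  apply PySem.List.foldl_congr_mem
  intro a k hk
  have h1 : (1 : Int) + (k : Int) - 1 = ((k : Nat) : Int) := by omega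
  have h2 : (1 : Int) + (k : Int) = (((k + 1 : Nat)) : Int) := by push_cast; omega
  rw [h1, h2, PySem.List.pyGetD_natCast, PySem.List.pyGetD_natCast]
  unfold pvStepA
  by_cases hc : (xs.getD k 0 < xs.getD (k + 1) 0 ∧ 0 < xs.getD k 0) ∨
      (xs.getD (k + 1) 0 < xs.getD k 0 ∧ xs.getD k 0 < 0)
  · rw [if_pos hc, decide_eq_true hc, if_pos rfl]
  · rw [if_neg hc, decide_eq_false hc, if_neg (by simp)]

-- B's filtered range is the break positions of the flags
lemma pvB_breaks (xs : List Int) :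
    (PySem.List.pyRange 1 (xs.length : Int) 1).filter
      (fun i => !decide ((PySem.List.pyGetD xs (i - 1) 0 < PySem.List.pyGetD xs i 0 ∧
                            0 < PySem.List.pyGetD xs (i - 1) 0) ∨
                         (PySem.List.pyGetD xs i 0 < PySem.List.pyGetD xs (i - 1) 0 ∧
                            PySem.List.pyGetD xs (i - 1) 0 < 0)))
    = pvBrk ((xs.zip xs.tail).map
        (fun p : Int × Int => decide ((p.1 < p.2 ∧ 0 < p.1) ∨ (p.2 < p.1 ∧ p.1 < 0)))) := by
  rw [PySem.List.pyRange_one]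
  have hlen : (((xs.length : Int)) - 1).toNat = xs.length - 1 := by omega
  rw [hlen, List.filter_map]
  unfold pvBrk
  rw [pv_filterMap_if, pv_flags_length]
  have hfilter : ∀ k ∈ List.range (xs.length - 1),
      ((fun i => !decide ((PySem.List.pyGetD xs (i - 1) 0 < PySem.List.pyGetD xs i 0 ∧
              0 < PySem.List.pyGetD xs (i - 1) 0) ∨
            (PySem.List.pyGetD xs i 0 < PySem.List.pyGetD xs (i - 1) 0 ∧
              PySem.List.pyGetD xs (i - 1) 0 < 0))) ∘ (fun k : Nat => 1 + (k : Int))) k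
      = !((xs.zip xs.tail).map (fun p : Int × Int =>
            decide ((p.1 < p.2 ∧ 0 < p.1) ∨ (p.2 < p.1 ∧ p.1 < 0)))).getD k false := by
    intro k hk
    have hk' : k < xs.length - 1 := List.mem_range.mp hk
    have h1 : (1 : Int) + (k : Int) - 1 = ((k : Nat) : Int) := by omega
    have h2 : (1 : Int) + (k : Int) = (((k + 1 : Nat)) : Int) := by push_cast; omega
    simp only [Function.comp_apply]
    rw [h1, h2, PySem.List.pyGetD_natCast, PySem.List.pyGetD_natCast, pv_flag_getD xs k hk']
  rw [List.filter_congr hfilter]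
  apply List.map_congr_left
  intro k _
  omega

-- ===== VERDICT (by name: the statement is the Claim_ definition above) =====
theorem calculate_longest_growth_decline_streak_spec : Claim_equal_calculate_longest_growth_decline_streak := by
  intro values _
  unfold Spec_calculate_longest_growth_decline_streak
  unfold calculate_longest_growth_decline_streak calculate_longest_growth_decline_streak_alt
  dsimp only
  by_cases h : (values.length : Int) ≤ 1
  · rw [if_neg (by omega), if_pos h]
  · rw [if_pos (by omega), if_neg h]
    rw [pvA_fold, pv_invA, pvB_breaks]
    have hfl : ((((values.zip values.tail).map
        (fun p : Int × Int => decide ((p.1 < p.2 ∧ 0 < p.1) ∨ (p.2 < p.1 ∧ p.1 < 0)))).length : Int)) + 1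
        = (values.length : Int) := by
      rw [pv_flags_length]; omega
    rw [hfl]
    set flags := (values.zip values.tail).map
        (fun p : Int × Int => decide ((p.1 < p.2 ∧ 0 < p.1) ∨ (p.2 < p.1 ∧ p.1 < 0))) with hflags
    simp only [List.cons_append]
    rw [pv_zip_gaps']
    cases hb : pvBrk flags with
    | nil =>
      simp only [List.nil_append, pvGaps, PySem.List.max?_id_cons, List.foldl_cons,
        List.foldl_nil]
      omega
    | cons x t =>
      have hx : 1 ≤ x := pvBrk_mem_pos flags x (by rw [hb]; exact List.mem_cons_self ..)
      simp only [List.cons_append, pvGaps, PySem.List.max?_id_cons, List.foldl_cons]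
      have : max 0 (x - 0) = x - 0 := by omega
      rw [this]
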